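-- pv_equiv track=rewrite | github.com/UserGhost411/Simple-IP-Calculator | Python/ipcalc.py | DecimaltoSubnetBiner
-- ===== SOURCE A (Python) =====
-- def DecimaltoSubnetBiner(a):
--     subnet = []
--     for i in range(4):
--         for i in range(8):
--             data='1' if a>0 else '0'
--             a-=1
--             subnet.append(str(data))
--         subnet.append('.')
--     return ("".join(subnet))[:-1]
-- ===== SOURCE B (Python) =====
-- def DecimaltoSubnetBiner(a):
--     bits = ''.join('1' if a > i else '0' for i in range(32))
--     return '.'.join(bits[j:j+8] for j in range(0, 32, 8))
-- ===== Notes on version B (the rewrite author's own statement) =====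
-- stated objective: simpler
-- what changed: Replaces the nested decrement-counter loops with interleaved dots and a trailing-dot strip by a single flat pass building the whole bit string from the predicate 'bit set iff a exceeds its position', followed by a separate regrouping pass that joins fixed-width octet slices with dots.
import Mathlib
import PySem

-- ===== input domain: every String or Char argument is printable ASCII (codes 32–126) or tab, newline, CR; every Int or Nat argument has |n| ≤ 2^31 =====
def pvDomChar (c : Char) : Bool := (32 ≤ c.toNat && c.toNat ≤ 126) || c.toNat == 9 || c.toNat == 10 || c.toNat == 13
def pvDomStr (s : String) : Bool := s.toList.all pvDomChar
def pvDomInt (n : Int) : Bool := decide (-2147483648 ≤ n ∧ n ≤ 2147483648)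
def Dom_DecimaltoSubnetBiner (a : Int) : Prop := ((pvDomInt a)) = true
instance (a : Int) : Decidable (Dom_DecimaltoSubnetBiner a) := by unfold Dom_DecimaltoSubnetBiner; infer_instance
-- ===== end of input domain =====

-- B builds the 32-bit string in one pass and regroups it into dotted octets (simpler: no nested loop, no trailing-dot strip).

-- ===== PORT A =====
-- literal port: nested for-loops appending '1'/'0' while decrementing a, a '.' after each octet, then [:-1]
def DecimaltoSubnetBiner (a : Int) : String :=
  let st := (List.range 4).foldl (fun (st : List String × Int) _ =>
      let st := (List.range 8).foldl (fun (st : List String × Int) _ =>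
          let data := if st.2 > 0 then "1" else "0"
          (st.1 ++ [data], st.2 - 1)) st
      (st.1 ++ ["."], st.2)) ([], a)
  PySem.Str.slice (PySem.Str.join "" st.1) none (some (-1))

-- ===== PORT B =====
def DecimaltoSubnetBiner_alt (a : Int) : String :=
  let bits := PySem.Str.join "" ((List.range 32).map (fun (i : Nat) => if a > (i : Int) then "1" else "0"))
  PySem.Str.join "." ((PySem.List.pyRange 0 32 8).map (fun j => PySem.Str.slice bits (some j) (some (j + 8))))

-- ===== PRECONDITION & SPEC =====
def Spec_DecimaltoSubnetBiner (a : Int) (out : String) : Prop := out = DecimaltoSubnetBiner_alt a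
instance (a : Int) (out : String) : Decidable (Spec_DecimaltoSubnetBiner a out) := by unfold Spec_DecimaltoSubnetBiner; infer_instance

-- ===== CLAIM (what is proved, stated in full; the proofs are below) =====
def Claim_equal_DecimaltoSubnetBiner : Prop := ∀ (a : Int), Dom_DecimaltoSubnetBiner a → Spec_DecimaltoSubnetBiner a (DecimaltoSubnetBiner a)

-- ===== LEMMAS AND PROOFS =====

def maskA (x : Int) : List String := (List.range 8).map (fun (i : Nat) => if x - (i : Int) > 0 then "1" else "0")

lemma inner_closed (n : Nat) (s : List String) (x : Int) :
    (List.range n).foldl (fun (st : List String × Int) _ =>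
        let data := if st.2 > 0 then "1" else "0"
        (st.1 ++ [data], st.2 - 1)) (s, x)
    = (s ++ (List.range n).map (fun (i : Nat) => if x - (i : Int) > 0 then "1" else "0"), x - n) := by
  induction n generalizing s x with
  | zero => simp
  | succ n ih =>
    rw [List.range_succ, List.foldl_append, ih, List.map_append]
    simp only [List.foldl_cons, List.foldl_nil, List.append_assoc, List.map_cons,
      List.map_nil, Prod.mk.injEq]
    refine ⟨trivial, by push_cast; ring⟩

lemma A_closed (a : Int) :
    DecimaltoSubnetBiner a
    = PySem.Str.slice (PySem.Str.join ""
        ((((maskA a ++ ["."]) ++ (maskA (a - 8) ++ ["."])) ++ (maskA (a - 8 - 8) ++ ["."])) ++ (maskA (a - 8 - 8 - 8) ++ ["."])))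
        none (some (-1)) := by
  unfold DecimaltoSubnetBiner maskA
  rw [show List.range 4 = [0, 1, 2, 3] from rfl]
  simp only [List.foldl_cons, List.foldl_nil, inner_closed]
  simp

lemma maskA_congr (x y : Int) (h : ∀ i : Nat, i < 8 → (x - (i : Int) > 0 ↔ y - (i : Int) > 0)) :
    maskA x = maskA y := by
  unfold maskA
  apply List.map_congr_left
  intro i hi
  rw [List.mem_range] at hi
  have := h i hi
  by_cases hx : x - (i : Int) > 0
  · rw [if_pos hx, if_pos (this.mp hx)]
  · rw [if_neg hx, if_neg (fun hy => hx (this.mpr hy))]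

lemma A_clamp (a c : Int) (h : ∀ k : Nat, k < 32 → ((k : Int) < a ↔ (k : Int) < c)) :
    DecimaltoSubnetBiner a = DecimaltoSubnetBiner c := by
  rw [A_closed, A_closed]
  have m0 : maskA a = maskA c := maskA_congr _ _ (by intro i hi; have := h i (by omega); omega)
  have m1 : maskA (a - 8) = maskA (c - 8) := maskA_congr _ _ (by intro i hi; have := h (i + 8) (by omega); push_cast at this ⊢; omega)
  have m2 : maskA (a - 8 - 8) = maskA (c - 8 - 8) := maskA_congr _ _ (by intro i hi; have := h (i + 16) (by omega); push_cast at this ⊢; omega)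
  have m3 : maskA (a - 8 - 8 - 8) = maskA (c - 8 - 8 - 8) := maskA_congr _ _ (by intro i hi; have := h (i + 24) (by omega); push_cast at this ⊢; omega)
  rw [m0, m1, m2, m3]

lemma B_clamp (a c : Int) (h : ∀ k : Nat, k < 32 → ((k : Int) < a ↔ (k : Int) < c)) :
    DecimaltoSubnetBiner_alt a = DecimaltoSubnetBiner_alt c := by
  unfold DecimaltoSubnetBiner_alt
  have : ((List.range 32).map (fun (i : Nat) => if a > (i : Int) then "1" else "0"))
       = ((List.range 32).map (fun (i : Nat) => if c > (i : Int) then "1" else "0")) := by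
    apply List.map_congr_left
    intro i hi
    rw [List.mem_range] at hi
    have := h i hi
    by_cases hx : a > (i : Int)
    · rw [if_pos hx, if_pos (this.mp hx)]
    · rw [if_neg hx, if_neg (fun hy => hx (this.mpr hy))]
  rw [this]

-- ===== VERDICT (by name: the statement is the Claim_ definition above) =====
set_option maxHeartbeats 4000000 in
theorem DecimaltoSubnetBiner_spec : Claim_equal_DecimaltoSubnetBiner := by
  intro a _
  unfold Spec_DecimaltoSubnetBiner
  obtain ⟨c, h0, h1, hcl⟩ :
      ∃ c : Int, 0 ≤ c ∧ c ≤ 32 ∧ ∀ k : Nat, k < 32 → ((k : Int) < a ↔ (k : Int) < c) :=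
    ⟨min 32 (max a 0), by omega, by omega, by
      intro k hk
      have : (k : Int) < 32 := by exact_mod_cast hk
      omega⟩
  rw [A_clamp a c hcl, B_clamp a c hcl]
  interval_cases c <;> decide
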